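-- pv_equiv track=rewrite | github.com/anuiit/AI_clinic_class | scripts/sql_to_csv_converter.py | create_relationships_csv
-- ===== SOURCE A (Python) =====
-- def create_relationships_csv(codex_data, glyphe_data, element_data):
--     """Create a comprehensive relationships CSV"""
--     relationships = []
--
--     # Header
--     relationships.append([
--         'codex_id', 'codex_titre',
--         'glyph_id', 'glyph_cote', 'glyph_lecture',
--         'element_id', 'element_name', 'element_theme'
--     ])
--
--     # Create dictionaries for quick lookup
--     codex_dict = {row[0]: row for row in codex_data}
--     glyphe_dict = {}
--     for row in glyphe_data:
--         key = (row[1], row[2])  # (codexid, cote)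
--         if key not in glyphe_dict:
--             glyphe_dict[key] = []
--         glyphe_dict[key].append(row)
--
--     # Process elements and link them
--     for element_row in element_data:
--         element_id = element_row[0]
--         codex_id = element_row[1]
--         cote = element_row[2]
--         element_name = element_row[3]
--         theme = element_row[4]
--
--         # Get codex info
--         codex_info = codex_dict.get(codex_id, ['', '', '', '', ''])
--         codex_titre = codex_info[1] if len(codex_info) > 1 else ''
--
--         # Get glyph info
--         glyph_key = (codex_id, cote)
--         glyphs = glyphe_dict.get(glyph_key, [[None, None, None, '', '']])
--
--         for glyph in glyphs:
--             glyph_id = glyph[0] if glyph[0] else ''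
--             glyph_lecture = glyph[3] if len(glyph) > 3 else ''
--
--             relationships.append([
--                 codex_id, codex_titre,
--                 glyph_id, cote, glyph_lecture,
--                 element_id, element_name, theme
--             ])
--
--     return relationships
-- ===== SOURCE B (Python) =====
-- def create_relationships_csv(codex_data, glyphe_data, element_data):
--     """Nested-loop join: no lookup dictionaries; scan the tables per element row."""
--     out = [[
--         'codex_id', 'codex_titre',
--         'glyph_id', 'glyph_cote', 'glyph_lecture',
--         'element_id', 'element_name', 'element_theme'
--     ]]
--     for e in element_data:
--         element_id, codex_id, cote, element_name, theme = e[0], e[1], e[2], e[3], e[4]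
--         # last codex row with matching id wins (same as dict overwrite)
--         titre = ''
--         for c in codex_data:
--             if c[0] == codex_id:
--                 titre = c[1] if len(c) > 1 else ''
--         matches = [g for g in glyphe_data if (g[1], g[2]) == (codex_id, cote)]
--         if matches:
--             for g in matches:
--                 out.append([codex_id, titre, g[0], cote,
--                             g[3] if len(g) > 3 else '',
--                             element_id, element_name, theme])
--         else:
--             out.append([codex_id, titre, '', cote, '',
--                         element_id, element_name, theme])
--     return out
-- ===== Notes on version B (the rewrite author's own statement) =====
-- stated objective: alternative
-- what changed: Replaces both pre-built lookup dictionaries with a direct nested-loop join: for each element row B scans codex_data for the last matching codex row and filters glyphe_data in place, emitting the sentinel row only when no glyph matches.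
import Mathlib
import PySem

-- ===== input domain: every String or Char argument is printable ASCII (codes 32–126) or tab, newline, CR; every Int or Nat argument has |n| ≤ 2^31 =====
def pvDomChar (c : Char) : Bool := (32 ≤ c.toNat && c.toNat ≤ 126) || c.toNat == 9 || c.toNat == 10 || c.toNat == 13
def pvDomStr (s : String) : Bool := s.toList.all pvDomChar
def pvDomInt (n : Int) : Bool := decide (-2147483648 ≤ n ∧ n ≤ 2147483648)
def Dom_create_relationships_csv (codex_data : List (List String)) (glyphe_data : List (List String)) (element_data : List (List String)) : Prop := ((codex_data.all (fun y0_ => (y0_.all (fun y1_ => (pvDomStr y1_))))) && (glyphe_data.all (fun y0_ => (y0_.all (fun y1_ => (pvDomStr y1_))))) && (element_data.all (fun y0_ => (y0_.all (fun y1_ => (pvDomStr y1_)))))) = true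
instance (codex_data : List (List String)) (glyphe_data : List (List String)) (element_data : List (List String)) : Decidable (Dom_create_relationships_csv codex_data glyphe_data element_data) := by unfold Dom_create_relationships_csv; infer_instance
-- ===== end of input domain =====

-- B replaces A's two pre-built lookup dictionaries by a direct nested-loop join (alternative decomposition, same results).


-- ===== PORT A =====
def crcHeader : List String :=
  ["codex_id", "codex_titre", "glyph_id", "glyph_cote", "glyph_lecture",
   "element_id", "element_name", "element_theme"]

-- Sentinel [[None, None, None, '', '']]: the None fields are represented by "" — the code
-- reads them only through `glyph[0] if glyph[0] else ''` (falsy) and `glyph[3]`, where None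
-- and '' behave identically, so the representation is exact on the output.
def crcSentinel : List (List String) := [["", "", "", "", ""]]

def create_relationships_csv (codex_data : List (List String)) (glyphe_data : List (List String)) (element_data : List (List String)) : List (List String) :=
  -- codex_dict = {row[0]: row for row in codex_data}
  let codex_dict : PySem.Dict String (List String) :=
    codex_data.foldl (fun d row => d.insert (row.getD 0 "") row) PySem.Dict.empty
  -- `if key not in glyphe_dict: glyphe_dict[key] = []` then `.append(row)` is exactly
  -- d[key] = d.get(key, []) + [row], i.e. Dict.modify (same insertion position).
  let glyphe_dict : PySem.Dict (String × String) (List (List String)) :=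
    glyphe_data.foldl (fun d row => d.modify (row.getD 1 "", row.getD 2 "") [] (· ++ [row])) PySem.Dict.empty
  element_data.foldl (fun rel element_row =>
    let element_id := element_row.getD 0 ""
    let codex_id := element_row.getD 1 ""
    let cote := element_row.getD 2 ""
    let element_name := element_row.getD 3 ""
    let theme := element_row.getD 4 ""
    let codex_info := codex_dict.getD codex_id ["", "", "", "", ""]
    let codex_titre := if codex_info.length > 1 then codex_info.getD 1 "" else ""
    let glyphs := glyphe_dict.getD (codex_id, cote) crcSentinel
    glyphs.foldl (fun rel glyph =>
      let g0 := glyph.getD 0 ""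
      let glyph_id := if g0 = "" then "" else g0      -- glyph[0] if glyph[0] else ''
      let glyph_lecture := if glyph.length > 3 then glyph.getD 3 "" else ""
      rel ++ [[codex_id, codex_titre, glyph_id, cote, glyph_lecture,
               element_id, element_name, theme]]) rel)
    [crcHeader]

-- ===== PORT B =====
def create_relationships_csv_alt (codex_data : List (List String)) (glyphe_data : List (List String)) (element_data : List (List String)) : List (List String) :=
  element_data.foldl (fun out e =>
    let element_id := e.getD 0 ""
    let codex_id := e.getD 1 ""
    let cote := e.getD 2 ""
    let element_name := e.getD 3 ""
    let theme := e.getD 4 ""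
    -- last codex row with matching id wins
    let titre := codex_data.foldl (fun t c =>
      if c.getD 0 "" = codex_id then (if c.length > 1 then c.getD 1 "" else "") else t) ""
    let ms := glyphe_data.filter (fun g => (g.getD 1 "", g.getD 2 "") = (codex_id, cote))
    if ms.isEmpty then
      out ++ [[codex_id, titre, "", cote, "", element_id, element_name, theme]]
    else
      out ++ ms.map (fun g =>
        [codex_id, titre, g.getD 0 "", cote,
         (if g.length > 3 then g.getD 3 "" else ""),
         element_id, element_name, theme]))
    [["codex_id", "codex_titre", "glyph_id", "glyph_cote", "glyph_lecture",
      "element_id", "element_name", "element_theme"]]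

-- ===== PRECONDITION & SPEC =====
-- Pre_ excludes exactly the inputs where the Python A raises IndexError: a codex row
-- shorter than 1 (row[0]), a glyphe row shorter than 3 (row[1], row[2]), or an element
-- row shorter than 5 (element_row[4]).
def Pre_create_relationships_csv (codex_data : List (List String)) (glyphe_data : List (List String)) (element_data : List (List String)) : Prop :=
  (∀ r ∈ codex_data, 1 ≤ r.length) ∧ (∀ r ∈ glyphe_data, 3 ≤ r.length) ∧ (∀ r ∈ element_data, 5 ≤ r.length)
instance (codex_data : List (List String)) (glyphe_data : List (List String)) (element_data : List (List String)) : Decidable (Pre_create_relationships_csv codex_data glyphe_data element_data) := by unfold Pre_create_relationships_csv; infer_instance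

def pvWitness_create_relationships_csv : List (List String) × List (List String) × List (List String) :=
  ([["c1", "Titre"]], [["g1", "c1", "A", "lect"]], [["e1", "c1", "A", "nom", "th"]])

def Spec_create_relationships_csv (codex_data : List (List String)) (glyphe_data : List (List String)) (element_data : List (List String)) (out : List (List String)) : Prop := out = create_relationships_csv_alt codex_data glyphe_data element_data
instance (codex_data : List (List String)) (glyphe_data : List (List String)) (element_data : List (List String)) (out : List (List String)) : Decidable (Spec_create_relationships_csv codex_data glyphe_data element_data out) := by unfold Spec_create_relationships_csv; infer_instance

-- ===== CLAIM (what is proved, stated in full; the proofs are below) =====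
def Claim_equal_create_relationships_csv : Prop := ∀ (codex_data : List (List String)) (glyphe_data : List (List String)) (element_data : List (List String)), Dom_create_relationships_csv codex_data glyphe_data element_data → Pre_create_relationships_csv codex_data glyphe_data element_data → Spec_create_relationships_csv codex_data glyphe_data element_data (create_relationships_csv codex_data glyphe_data element_data)

-- ===== LEMMAS AND PROOFS =====

-- A's codex_dict lookup-then-extract equals B's last-match fold over codex_data.
lemma crc_codex_fold (l : List (List String)) (d : PySem.Dict String (List String)) (k : String) :
    (let info := (l.foldl (fun d row => d.insert (row.getD 0 "") row) d).getD k ["", "", "", "", ""]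
     if info.length > 1 then info.getD 1 "" else "")
    = l.foldl (fun t c => if c.getD 0 "" = k then (if c.length > 1 then c.getD 1 "" else "") else t)
        (let info := d.getD k ["", "", "", "", ""]
         if info.length > 1 then info.getD 1 "" else "") := by
  induction l generalizing d with
  | nil => rfl
  | cons c rest ih =>
      simp only [List.foldl_cons]
      rw [ih]
      by_cases h : c.getD 0 "" = k
      · simp only [List.getD] at h ⊢
        simp [h]
      · have h' : k ≠ c.getD 0 "" := fun he => h he.symm
        simp only [List.getD] at h h' ⊢
        simp [PySem.Dict.getD_insert, h, h']

-- Value at a key after A's grouping loop: initial value ++ the matching rows, in order.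
lemma crc_glyph_fold_getD (l : List (List String)) (d : PySem.Dict (String × String) (List (List String))) (k : String × String) :
    (l.foldl (fun d row => d.modify (row.getD 1 "", row.getD 2 "") [] (· ++ [row])) d).getD k []
    = d.getD k [] ++ l.filter (fun g => (g.getD 1 "", g.getD 2 "") = k) := by
  induction l generalizing d with
  | nil => simp
  | cons g rest ih =>
      simp only [List.foldl_cons, List.filter_cons]
      rw [ih]
      by_cases h : (g.getD 1 "", g.getD 2 "") = k
      · simp only [List.getD] at h ⊢
        simp [h]
      · have h' : k ≠ (g.getD 1 "", g.getD 2 "") := fun he => h he.symm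
        simp only [List.getD] at h h' ⊢
        simp [PySem.Dict.getD_modify, h, h']

-- Key presence after A's grouping loop.
lemma crc_glyph_fold_contains (l : List (List String)) (d : PySem.Dict (String × String) (List (List String))) (k : String × String) :
    (l.foldl (fun d row => d.modify (row.getD 1 "", row.getD 2 "") [] (· ++ [row])) d).contains k
    = (d.contains k || !(l.filter (fun g => (g.getD 1 "", g.getD 2 "") = k)).isEmpty) := by
  induction l generalizing d with
  | nil => simp
  | cons g rest ih =>
      simp only [List.foldl_cons, List.filter_cons]
      rw [ih]
      by_cases h : (g.getD 1 "", g.getD 2 "") = k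
      · simp only [List.getD] at h ⊢
        simp [PySem.Dict.contains_modify, h]
      · have h' : ¬ (k == (g.getD 1 "", g.getD 2 "")) = true := by
          simp only [beq_iff_eq]
          exact fun he => h he.symm
        simp only [List.getD] at h h' ⊢
        simp [PySem.Dict.contains_modify, h, h']

-- A's `glyphe_dict.get(key, [sentinel])` equals: matching rows, or the sentinel if none.
lemma crc_glyph_lookup (l : List (List String)) (k : String × String) :
    (l.foldl (fun d row => d.modify (row.getD 1 "", row.getD 2 "") [] (· ++ [row])) PySem.Dict.empty).getD k crcSentinel
    = (let f := l.filter (fun g => (g.getD 1 "", g.getD 2 "") = k)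
       if f.isEmpty then crcSentinel else f) := by
  set D := l.foldl (fun d row => d.modify (row.getD 1 "", row.getD 2 "") [] (· ++ [row])) PySem.Dict.empty with hD
  have hc : D.contains k = !(l.filter (fun g => (g.getD 1 "", g.getD 2 "") = k)).isEmpty := by
    rw [hD, crc_glyph_fold_contains]
    simp only [PySem.Dict.contains_empty, Bool.false_or]
  have hg : D.getD k [] = l.filter (fun g => (g.getD 1 "", g.getD 2 "") = k) := by
    rw [hD, crc_glyph_fold_getD]; simp
  by_cases he : (l.filter (fun g => (g.getD 1 "", g.getD 2 "") = k)).isEmpty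
  · have hcf : D.contains k = false := by rw [hc, he]; rfl
    rw [PySem.Dict.getD_of_not_contains D crcSentinel hcf, if_pos he]
  · have hct : D.contains k = true := by
      rw [hc, Bool.not_eq_true']
      exact Bool.eq_false_iff.mpr he
    obtain ⟨v, hv⟩ : ∃ v, D.get? k = some v := by
      have h := PySem.Dict.contains_eq_isSome_get? D k
      rw [hct] at h
      exact Option.isSome_iff_exists.mp h.symm
    have h1 : D.getD k crcSentinel = v := PySem.Dict.getD_of_get?_eq_some D crcSentinel hv
    have h2 : D.getD k [] = v := PySem.Dict.getD_of_get?_eq_some D [] hv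
    rw [h1, ← h2, hg, if_neg he]

-- foldl respects pointwise-equal step functions.
lemma crc_foldl_congr {α β : Type} {f g : α → β → α} (h : ∀ a b, f a b = g a b)
    (l : List β) (init : α) : l.foldl f init = l.foldl g init := by
  have hfg : f = g := funext fun a => funext fun b => h a b
  rw [hfg]

-- The two per-element steps coincide.
lemma crc_step_eq (codex_data glyphe_data : List (List String)) (rel : List (List String)) (e : List String) :
    (let element_id := e.getD 0 ""
     let codex_id := e.getD 1 ""
     let cote := e.getD 2 ""
     let element_name := e.getD 3 ""
     let theme := e.getD 4 ""
     let codex_dict := codex_data.foldl (fun d row => d.insert (row.getD 0 "") row) PySem.Dict.empty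
     let glyphe_dict := glyphe_data.foldl (fun d row => d.modify (row.getD 1 "", row.getD 2 "") [] (· ++ [row])) PySem.Dict.empty
     let codex_info := codex_dict.getD codex_id ["", "", "", "", ""]
     let codex_titre := if codex_info.length > 1 then codex_info.getD 1 "" else ""
     let glyphs := glyphe_dict.getD (codex_id, cote) crcSentinel
     glyphs.foldl (fun rel glyph =>
       let g0 := glyph.getD 0 ""
       let glyph_id := if g0 = "" then "" else g0
       let glyph_lecture := if glyph.length > 3 then glyph.getD 3 "" else ""
       rel ++ [[codex_id, codex_titre, glyph_id, cote, glyph_lecture,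
                element_id, element_name, theme]]) rel)
    = (let element_id := e.getD 0 ""
       let codex_id := e.getD 1 ""
       let cote := e.getD 2 ""
       let element_name := e.getD 3 ""
       let theme := e.getD 4 ""
       let titre := codex_data.foldl (fun t c =>
         if c.getD 0 "" = codex_id then (if c.length > 1 then c.getD 1 "" else "") else t) ""
       let ms := glyphe_data.filter (fun g => (g.getD 1 "", g.getD 2 "") = (codex_id, cote))
       if ms.isEmpty then
         rel ++ [[codex_id, titre, "", cote, "", element_id, element_name, theme]]
       else
         rel ++ ms.map (fun g =>
           [codex_id, titre, g.getD 0 "", cote,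
            (if g.length > 3 then g.getD 3 "" else ""),
            element_id, element_name, theme])) := by
  simp only
  rw [crc_glyph_lookup]
  have htitre := crc_codex_fold codex_data PySem.Dict.empty (e.getD 1 "")
  simp only [PySem.Dict.getD_empty] at htitre
  rw [htitre]
  by_cases he : (glyphe_data.filter (fun g => (g.getD 1 "", g.getD 2 "") = (e.getD 1 "", e.getD 2 ""))).isEmpty
  · rw [if_pos he, if_pos he]
    simp [crcSentinel]
  · rw [if_neg he, if_neg he, PySem.List.foldl_append_singleton_eq_map]
    congr 1
    apply List.map_congr_left
    intro g _
    simp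

-- ===== VERDICT (by name: the statement is the Claim_ definition above) =====
theorem create_relationships_csv_spec : Claim_equal_create_relationships_csv := by
  intro codex_data glyphe_data element_data _ _
  unfold Spec_create_relationships_csv create_relationships_csv create_relationships_csv_alt
  simp only
  exact crc_foldl_congr (crc_step_eq codex_data glyphe_data) element_data _
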